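-- pv_equiv track=rewrite | github.com/pierreguillaumelaurin/aoc2023 | src/day13/day13.py | lines_above_horizontal_reflection_line
-- ===== SOURCE A (Python) =====
-- from typing import List
--
-- def lines_above_horizontal_reflection_line(matrix: List[list | str]):
--     def is_horizontal_index(one_based_index: int):
--         if len(matrix[:one_based_index]) < len(matrix[one_based_index:]):
--             return matrix[:one_based_index] == list(
--                 reversed(matrix[one_based_index : one_based_index * 2])
--             )
--         symmetry_beginning_index = one_based_index - len(matrix[one_based_index:])
--         return matrix[symmetry_beginning_index:one_based_index] == list(
--             reversed(matrix[one_based_index:])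
--         )
--
--     def find_horizontal_index(horizontal_index_candidates: List[int]):
--         return next(
--             (i for i in horizontal_index_candidates if is_horizontal_index(i + 1)),
--             -1,
--         )
--
--     horizontal_line_indexes_candidates = [
--         i for i in range(len(matrix[:-1])) if matrix[i] == matrix[i + 1]
--     ]
--     return find_horizontal_index(horizontal_line_indexes_candidates) + 1
-- ===== SOURCE B (Python) =====
-- def lines_above_horizontal_reflection_line(matrix):
--     n = len(matrix)
--     for k in range(1, n):
--         span = min(k, n - k)
--         if all(matrix[k - 1 - j] == matrix[k + j] for j in range(span)):
--             return k
--     return 0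
-- ===== Notes on version B (the rewrite author's own statement) =====
-- stated objective: alternative
-- what changed: Replaces A's candidate prefilter plus per-candidate slice/list(reversed(...))/whole-list comparisons with a single scan over fold positions that compares row pairs in place, expanding outward and stopping at the first mismatched pair (no list copies).
import Mathlib
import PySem

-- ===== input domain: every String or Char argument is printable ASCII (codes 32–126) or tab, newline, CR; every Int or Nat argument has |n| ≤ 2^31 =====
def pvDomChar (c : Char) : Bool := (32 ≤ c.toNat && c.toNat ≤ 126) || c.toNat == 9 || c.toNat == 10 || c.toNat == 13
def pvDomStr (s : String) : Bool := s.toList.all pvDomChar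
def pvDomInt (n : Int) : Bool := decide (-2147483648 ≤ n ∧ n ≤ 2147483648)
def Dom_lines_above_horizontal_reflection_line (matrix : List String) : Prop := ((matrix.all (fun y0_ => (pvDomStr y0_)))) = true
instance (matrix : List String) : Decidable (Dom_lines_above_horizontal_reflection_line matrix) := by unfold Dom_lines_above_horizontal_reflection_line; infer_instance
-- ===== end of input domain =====

-- B replaces A's slice/reverse/compare machinery by an in-place, early-exiting outward pairwise scan with no list copies.

-- ===== PORT A =====
-- is_horizontal_index(one_based_index), with matrix captured
def pvA_isH (matrix : List String) (k : Int) : Bool :=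
  if (PySem.List.slice matrix none (some k)).length < (PySem.List.slice matrix (some k) none).length then
    PySem.List.slice matrix none (some k) == (PySem.List.slice matrix (some k) (some (k * 2))).reverse
  else
    let s : Int := k - (PySem.List.slice matrix (some k) none).length
    PySem.List.slice matrix (some s) (some k) == (PySem.List.slice matrix (some k) none).reverse

def lines_above_horizontal_reflection_line (matrix : List String) : Int :=
  let candidates : List Int :=
    (PySem.List.pyRange 0 ((PySem.List.slice matrix none (some (-1))).length : Int) 1).filter
      (fun i => PySem.List.pyGet? matrix i == PySem.List.pyGet? matrix (i + 1))
  ((candidates.find? (fun i => pvA_isH matrix (i + 1))).getD (-1)) + 1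

-- ===== PORT B =====
-- all(matrix[k-1-j] == matrix[k+j] for j in range(min(k, n-k)))
def pvB_mirror (matrix : List String) (k : Nat) : Bool :=
  (List.range (min k (matrix.length - k))).all
    (fun j => matrix.getD (k - 1 - j) "" == matrix.getD (k + j) "")

def lines_above_horizontal_reflection_line_alt (matrix : List String) : Int :=
  match (List.range' 1 (matrix.length - 1)).find? (fun k => pvB_mirror matrix k) with
  | some k => (k : Int)
  | none => 0

-- ===== PRECONDITION & SPEC =====
def Spec_lines_above_horizontal_reflection_line (matrix : List String) (out : Int) : Prop := out = lines_above_horizontal_reflection_line_alt matrix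
instance (matrix : List String) (out : Int) : Decidable (Spec_lines_above_horizontal_reflection_line matrix out) := by unfold Spec_lines_above_horizontal_reflection_line; infer_instance

-- ===== CLAIM (what is proved, stated in full; the proofs are below) =====
def Claim_equal_lines_above_horizontal_reflection_line : Prop := ∀ (matrix : List String), Dom_lines_above_horizontal_reflection_line matrix → Spec_lines_above_horizontal_reflection_line matrix (lines_above_horizontal_reflection_line matrix)

-- ===== LEMMAS AND PROOFS =====

-- find? respects a predicate equality that holds on the list's members
theorem pv_find?_congr_mem {α : Type} {p q : α → Bool} :
    ∀ (l : List α), (∀ a ∈ l, p a = q a) → l.find? p = l.find? q := by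
  intro l
  induction l with
  | nil => intro _; rfl
  | cons x xs ih =>
    intro h
    simp only [List.find?_cons, h x (by simp)]
    cases hq : q x with
    | true => rfl
    | false => exact ih (fun a ha => h a (by simp [ha]))

-- the invariant mirror condition: rows pair off around the fold line at k
def pvRefl (matrix : List String) (k : Nat) : Prop :=
  ∀ j < min k (matrix.length - k),
    matrix.getD (k - 1 - j) "" = matrix.getD (k + j) ""

theorem pvB_mirror_iff (matrix : List String) (k : Nat) :
    pvB_mirror matrix k = true ↔ pvRefl matrix k := by
  simp [pvB_mirror, pvRefl, List.all_eq_true, List.mem_range]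

-- slice-equality ↔ pointwise mirror, in the unified form both of A's branches take
theorem pv_sliceEq_iff (matrix : List String) (k L : Nat)
    (hLk : L ≤ k) (hkL : k + L ≤ matrix.length) :
    ((matrix.drop (k - L)).take L = ((matrix.drop k).take L).reverse ↔
      ∀ j < L, matrix.getD (k - 1 - j) "" = matrix.getD (k + j) "") := by
  have hlen1 : ((matrix.drop (k - L)).take L).length = L := by
    simp [List.length_take, List.length_drop]; omega
  have hlen2 : (((matrix.drop k).take L).reverse).length = L := by
    simp [List.length_take, List.length_drop]; omega
  constructor
  · intro heq j hj
    have h1 : j < ((matrix.drop (k - L)).take L).length := by omega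
    have := List.getElem_of_eq heq h1
    have e1 : ((matrix.drop (k - L)).take L)[j] = matrix[k - L + j]'(by omega) := by
      simp [List.getElem_take, List.getElem_drop]
    have e2 : (((matrix.drop k).take L).reverse)[j]'(by omega)
        = matrix[k + (L - 1 - j)]'(by omega) := by
      simp [List.getElem_reverse, List.getElem_take, List.getElem_drop]
      congr 1
      simp [List.length_take, List.length_drop]
      omega
    -- instantiate at index L-1-j to get the mirror form
    have hj' : L - 1 - j < ((matrix.drop (k - L)).take L).length := by omega
    have := List.getElem_of_eq heq hj'
    have e1' : ((matrix.drop (k - L)).take L)[L - 1 - j] = matrix[k - 1 - j]'(by omega) := by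
      simp [List.getElem_take, List.getElem_drop]
      congr 1; omega
    have e2' : (((matrix.drop k).take L).reverse)[L - 1 - j]'(by omega)
        = matrix[k + j]'(by omega) := by
      simp [List.getElem_reverse, List.getElem_take, List.getElem_drop]
      congr 1
      simp [List.length_take, List.length_drop]
      omega
    rw [e1', e2'] at this
    rw [List.getD_eq_getElem _ _ (by omega), List.getD_eq_getElem _ _ (by omega)]
    exact this
  · intro h
    apply List.ext_getElem (by omega)
    intro j h1 h2
    have hjL : j < L := by omega
    have e1 : ((matrix.drop (k - L)).take L)[j] = matrix[k - L + j]'(by omega) := by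
      simp [List.getElem_take, List.getElem_drop]
    have e2 : (((matrix.drop k).take L).reverse)[j] = matrix[k + (L - 1 - j)]'(by omega) := by
      simp [List.getElem_reverse, List.getElem_take, List.getElem_drop]
      congr 1
      simp [List.length_take, List.length_drop]
      omega
    rw [e1, e2]
    have := h (L - 1 - j) (by omega)
    rw [List.getD_eq_getElem _ _ (by omega), List.getD_eq_getElem _ _ (by omega)] at this
    have ei : k - 1 - (L - 1 - j) = k - L + j := by omega
    rw [show matrix[k - 1 - (L - 1 - j)]'(by omega) = matrix[k - L + j]'(by omega) by congr 1] at this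
    exact this

-- A's per-index check agrees with B's mirror check on the indices both scan
theorem pvA_isH_eq (matrix : List String) (k : Nat) (hk1 : 1 ≤ k)
    (hk2 : k ≤ matrix.length - 1) :
    pvA_isH matrix (k : Int) = pvB_mirror matrix k := by
  have hn : k < matrix.length := by omega
  rw [pvA_isH]
  rw [PySem.List.slice_to_natCast, PySem.List.slice_from_natCast]
  have hmul : ((k : Int) * 2) = (((k * 2 : Nat) : Int)) := by push_cast; ring
  rw [hmul, PySem.List.slice_natCast]
  simp only [List.length_take, List.length_drop]
  by_cases hcase : k < matrix.length - k
  · -- short prefix branch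
    rw [if_pos (by omega)]
    have h2k : k * 2 - k = k := by omega
    rw [h2k]
    have hL : min k (matrix.length - k) = k := by omega
    rw [Bool.eq_iff_iff, beq_iff_eq, pvB_mirror_iff]
    have := pv_sliceEq_iff matrix k k (le_refl k) (by omega)
    simp only [Nat.sub_self, List.drop_zero] at this
    rw [this]
    unfold pvRefl
    rw [hL]
  · -- long prefix branch
    rw [if_neg (by omega)]
    have hs : ((k : Int) - ((matrix.length - k : Nat) : Int)) = (((k - (matrix.length - k) : Nat) : Int)) := by
      push_cast [Nat.cast_sub (by omega : k ≤ matrix.length)]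
      omega
    rw [hs, PySem.List.slice_natCast]
    have hL : min k (matrix.length - k) = matrix.length - k := by omega
    have harg : k - (k - (matrix.length - k)) = matrix.length - k := by omega
    rw [harg]
    rw [Bool.eq_iff_iff, beq_iff_eq, pvB_mirror_iff]
    rw [show (matrix.drop k).reverse = ((matrix.drop k).take (matrix.length - k)).reverse from by
      rw [List.take_of_length_le (by simp)]]
    have := pv_sliceEq_iff matrix k (matrix.length - k) (by omega) (by omega)
    rw [this]
    unfold pvRefl
    rw [hL]

-- B's mirror check at k implies A's adjacency prefilter at k-1
theorem pv_mirror_adj (matrix : List String) (k : Nat) (hk1 : 1 ≤ k)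
    (hk2 : k ≤ matrix.length - 1) (h : pvB_mirror matrix k = true) :
    matrix[k - 1]? = matrix[k]? := by
  have hn : k < matrix.length := by omega
  rw [pvB_mirror_iff] at h
  have := h 0 (by omega)
  simp only [Nat.sub_zero, Nat.add_zero] at this
  rw [List.getD_eq_getElem _ _ (by omega), List.getD_eq_getElem _ _ (by omega)] at this
  rw [List.getElem?_eq_getElem (by omega : k - 1 < matrix.length),
      List.getElem?_eq_getElem hn]
    <;> exact congrArg some this

-- find? over a filtered list = find? of the conjoined predicate
theorem pv_find?_filter {α : Type} (p q : α → Bool) : ∀ (l : List α),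
    (l.filter q).find? p = l.find? (fun x => q x && p x) := by
  intro l
  induction l with
  | nil => rfl
  | cons x xs ih =>
    by_cases hq : q x
    · by_cases hp : p x
      · simp [hq, List.find?_cons, hp]
      · simp [List.filter_cons, hq, hp, ih]
    · simp [List.filter_cons, hq, List.find?_cons, ih]

-- ===== VERDICT (by name: the statement is the Claim_ definition above) =====
theorem lines_above_horizontal_reflection_line_spec : Claim_equal_lines_above_horizontal_reflection_line := by
  intro matrix _
  unfold Spec_lines_above_horizontal_reflection_line
  unfold lines_above_horizontal_reflection_line lines_above_horizontal_reflection_line_alt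
  simp only [PySem.List.slice_to_neg_one, List.length_dropLast]
  rw [PySem.List.pyRange_zero_nat, pv_find?_filter, List.find?_map,
      List.range'_eq_map_range, List.find?_map]
  have hpred : ∀ i ∈ List.range (matrix.length - 1),
      ((fun x => (PySem.List.pyGet? matrix x == PySem.List.pyGet? matrix (x + 1)) &&
          pvA_isH matrix (x + 1)) ∘ (fun k : Nat => (k : Int))) i
        = ((fun k => pvB_mirror matrix k) ∘ (fun k : Nat => 1 + k)) i := by
    intro i hi
    rw [List.mem_range] at hi
    simp only [Function.comp]
    have hc : ((i : Int) + 1) = ((i + 1 : Nat) : Int) := by push_cast; ring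
    rw [hc, pvA_isH_eq matrix (i + 1) (by omega) (by omega), Nat.add_comm 1 i]
    cases hb : pvB_mirror matrix (i + 1) with
    | true =>
      have := pv_mirror_adj matrix (i + 1) (by omega) (by omega) hb
      simp only [Nat.add_sub_cancel] at this
      rw [Bool.and_true, PySem.List.pyGet?_natCast, PySem.List.pyGet?_natCast, this]
      exact beq_self_eq_true _
    | false => rw [Bool.and_false]
  rw [pv_find?_congr_mem _ hpred]
  cases h : (List.range (matrix.length - 1)).find? ((fun k => pvB_mirror matrix k) ∘ (fun k : Nat => 1 + k)) with
  | none => simp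
  | some i => simp ; push_cast ; ring
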